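-- pv_equiv track=rewrite | github.com/Chocon2911/Tic-Tac-Toe_Statistic-Method | generate_v1_5.py | generate_base_masks
-- ===== SOURCE A (Python) =====
-- def generate_base_masks(n):
--     """
--     Tạo base masks tối thiểu cho bảng NxN.
--     Nhờ D8 symmetry (rotation + reflection), chỉ cần:
--     - Nếu n chẵn: n // 2 hàng ngang
--     - Nếu n lẻ: n // 2 + 1 hàng ngang (có hàng giữa)
--     - 1 đường chéo chính
--
--     Ví dụ:
--     - 4x4 (chẵn): 4//2 = 2 hàng → 2 hàng + 1 chéo = 3 cases
--     - 5x5 (lẻ): 5//2 + 1 = 3 hàng → 3 hàng + 1 chéo = 4 cases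
--
--     Mỗi case có 2 variants (player 1 và player 2)
--     """
--     size = n * n
--     masks = []
--
--     # Số hàng ngang cần
--     if n % 2 == 0:  # n chẵn
--         num_rows = n // 2
--     else:  # n lẻ (có hàng giữa)
--         num_rows = n // 2 + 1
--
--     # Hàng ngang cho player 1
--     for row_idx in range(num_rows):
--         row = [1 if row_idx * n <= i < (row_idx + 1) * n else 0 for i in range(size)]
--         masks.append(row)
--
--     # Đường chéo chính cho player 1
--     diag1 = [1 if i % (n + 1) == 0 and i < size else 0 for i in range(size)]
--     masks.append(diag1)
--
--     # Tương tự cho player 2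
--     for row_idx in range(num_rows):
--         row = [2 if row_idx * n <= i < (row_idx + 1) * n else 0 for i in range(size)]
--         masks.append(row)
--
--     # Đường chéo chính cho player 2
--     diag1_p2 = [2 if i % (n + 1) == 0 and i < size else 0 for i in range(size)]
--     masks.append(diag1_p2)
--
--     return masks
-- ===== SOURCE B (Python) =====
-- def generate_base_masks(n):
--     size = n * n
--     half = [[0] * (r * n) + [1] * n + [0] * (size - (r + 1) * n)
--             for r in range((n + 1) // 2)]
--     half.append((([1] + [0] * n) * n)[:size])
--     return half + [[2 * v for v in m] for m in half]
-- ===== Notes on version B (the rewrite author's own statement) =====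
-- stated objective: simpler
-- what changed: B constructs only the player-1 half: each row mask by concatenating three replicate blocks [0]*a+[1]*n+[0]*b, and the diagonal by truncating the tiled pattern ([1]+[0]*n)*n to n*n; the player-2 half is then derived by scaling every cell of the half by 2, eliminating A's duplicated per-player blocks and its per-position conditional tests.
-- outside the precondition, e.g. on generate_base_masks(-2): A returns [[1, 1, 1, 1], [2, 2, 2, 2]], B returns [[], []]; on generate_base_masks(-1): A raises ZeroDivisionError, B returns [[], []]
import Mathlib
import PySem

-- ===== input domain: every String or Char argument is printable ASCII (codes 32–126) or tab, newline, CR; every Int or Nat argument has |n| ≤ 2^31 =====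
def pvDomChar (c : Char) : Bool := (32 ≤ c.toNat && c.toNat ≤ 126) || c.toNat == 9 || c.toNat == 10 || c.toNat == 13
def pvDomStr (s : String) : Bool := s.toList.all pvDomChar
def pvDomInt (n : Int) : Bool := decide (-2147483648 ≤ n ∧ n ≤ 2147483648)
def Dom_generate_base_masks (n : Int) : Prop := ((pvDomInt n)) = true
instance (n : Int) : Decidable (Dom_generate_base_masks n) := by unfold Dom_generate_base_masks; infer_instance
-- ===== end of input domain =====

-- B builds only the player-1 half (rows by concatenating replicate blocks, the diagonal by
-- truncating a tiled ([1]+[0]*n)*n pattern) and derives the player-2 half by scaling every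
-- cell by 2; objective: simpler. Pre_ restricts to the natural domain n ≥ 0 (board sizes):
-- A raises at n = -1 and its other negative-n values are accidents of Python's modulo.


-- ===== PORT A =====
def generate_base_masks (n : Int) : List (List Int) :=
  let size := n * n
  let masks : List (List Int) := []
  let num_rows : Int :=
    if PySem.Int.mod n 2 = 0 then PySem.Int.floordiv n 2
    else PySem.Int.floordiv n 2 + 1
  let masks := (PySem.List.pyRange 0 num_rows 1).foldl (fun ms row_idx =>
    ms ++ [(PySem.List.pyRange 0 size 1).map (fun i =>
      if row_idx * n ≤ i ∧ i < (row_idx + 1) * n then (1 : Int) else 0)]) masks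
  let masks := masks ++ [(PySem.List.pyRange 0 size 1).map (fun i =>
      if PySem.Int.mod i (n + 1) = 0 ∧ i < size then (1 : Int) else 0)]
  let masks := (PySem.List.pyRange 0 num_rows 1).foldl (fun ms row_idx =>
    ms ++ [(PySem.List.pyRange 0 size 1).map (fun i =>
      if row_idx * n ≤ i ∧ i < (row_idx + 1) * n then (2 : Int) else 0)]) masks
  masks ++ [(PySem.List.pyRange 0 size 1).map (fun i =>
      if PySem.Int.mod i (n + 1) = 0 ∧ i < size then (2 : Int) else 0)]

-- ===== PORT B =====
def generate_base_masks_alt (n : Int) : List (List Int) :=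
  let size := n * n
  let half := (PySem.List.pyRange 0 (PySem.Int.floordiv (n + 1) 2) 1).map (fun r =>
    PySem.List.pyRepeat [(0 : Int)] (r * n) ++ PySem.List.pyRepeat [(1 : Int)] n
      ++ PySem.List.pyRepeat [(0 : Int)] (size - (r + 1) * n))
  let half := half ++ [PySem.List.slice
      (PySem.List.pyRepeat ([(1 : Int)] ++ PySem.List.pyRepeat [(0 : Int)] n) n)
      none (some size)]
  half ++ half.map (fun m => m.map (fun v => 2 * v))

-- ===== PRECONDITION & SPEC =====
-- Pre_ restricts to the natural domain n ≥ 0 (board sizes). It excludes n = -1, where A raises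
-- ZeroDivisionError, and the other negative n, where A's all-ones/strided "diagonals" are an
-- accident of Python's modulo with a negative divisor, not board masks.
def Pre_generate_base_masks (n : Int) : Prop := 0 ≤ n
instance (n : Int) : Decidable (Pre_generate_base_masks n) := by unfold Pre_generate_base_masks; infer_instance
def pvWitness_generate_base_masks : Int := 3
def Spec_generate_base_masks (n : Int) (out : List (List Int)) : Prop := out = generate_base_masks_alt n
instance (n : Int) (out : List (List Int)) : Decidable (Spec_generate_base_masks n out) := by unfold Spec_generate_base_masks; infer_instance

-- ===== CLAIM (what is proved, stated in full; the proofs are below) =====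
def Claim_equal_generate_base_masks : Prop := ∀ (n : Int), Dom_generate_base_masks n → Pre_generate_base_masks n → Spec_generate_base_masks n (generate_base_masks n)

-- ===== LEMMAS AND PROOFS =====

-- a 0/v-band comprehension over range M is three replicate blocks (Nat form)
theorem pvBandEq (M a b : Nat) (v z : Int) (hab : a ≤ b) (hbM : b ≤ M) :
    (List.range M).map (fun k => if a ≤ k ∧ k < b then v else z)
      = List.replicate a z ++ List.replicate (b - a) v ++ List.replicate (M - b) z := by
  apply List.ext_getElem
  · simp; omega
  · intro j h1 h2
    simp only [List.getElem_map, List.getElem_range, List.getElem_append,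
      List.length_replicate, List.getElem_replicate, List.length_append]
    split_ifs <;> first | rfl | (exfalso; omega)

-- A's row comprehension at r = R, in canonical three-block form
theorem pvRowAEq (N R : Nat) (hRN : R < N) (v : Int) :
    (PySem.List.pyRange 0 ((N : Int) * (N : Int)) 1).map (fun i =>
        if (R : Int) * (N : Int) ≤ i ∧ i < ((R : Int) + 1) * (N : Int) then v else (0 : Int))
      = List.replicate (R * N) 0 ++ List.replicate N v
          ++ List.replicate (N * N - (R * N + N)) 0 := by
  have e1 : ((R : Int) * (N : Int)) = ((R * N : Nat) : Int) := by push_cast; ring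
  have e2 : (((R : Int) + 1) * (N : Int)) = ((R * N + N : Nat) : Int) := by push_cast; ring
  have hb : R * N + N ≤ N * N := by nlinarith
  rw [e1, e2, PySem.List.pyRange_one]
  simp only [List.map_map, sub_zero]
  rw [show (((N : Int) * (N : Int))).toNat = N * N by rw [← Nat.cast_mul]; omega]
  have hfun : ((fun i => if ((R * N : Nat) : Int) ≤ i ∧ i < ((R * N + N : Nat) : Int) then v else (0 : Int)) ∘ fun k : Nat => (0 : Int) + (k : Int))
      = fun k : Nat => if R * N ≤ k ∧ k < R * N + N then v else (0 : Int) := by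
    funext k
    simp only [Function.comp, zero_add]
    by_cases hc : R * N ≤ k ∧ k < R * N + N
    · rw [if_pos hc, if_pos ⟨by exact_mod_cast hc.1, by exact_mod_cast hc.2⟩]
    · rw [if_neg hc, if_neg (fun hcc => hc ⟨by exact_mod_cast hcc.1, by exact_mod_cast hcc.2⟩)]
  rw [hfun, pvBandEq (N * N) (R * N) (R * N + N) v 0 (by omega) hb]
  rw [show R * N + N - R * N = N by omega]

-- B's row (three pyRepeat blocks) at r = R equals the same canonical form with v = 1
theorem pvRowBEq (N R : Nat) (hRN : R < N) :
    PySem.List.pyRepeat [(0 : Int)] ((R : Int) * (N : Int))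
        ++ PySem.List.pyRepeat [(1 : Int)] (N : Int)
        ++ PySem.List.pyRepeat [(0 : Int)] ((N : Int) * (N : Int) - ((R : Int) + 1) * (N : Int))
      = List.replicate (R * N) 0 ++ List.replicate N 1
          ++ List.replicate (N * N - (R * N + N)) 0 := by
  have hb : R * N + N ≤ N * N := by nlinarith
  have e1 : ((R : Int) * (N : Int)) = ((R * N : Nat) : Int) := by push_cast; ring
  have e3 : ((N : Int) * (N : Int) - ((R : Int) + 1) * (N : Int))
      = ((N * N - (R * N + N) : Nat) : Int) := by
    rw [Nat.cast_sub hb]; push_cast; ring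
  rw [e1, e3, PySem.List.pyRepeat_singleton, PySem.List.pyRepeat_singleton,
    PySem.List.pyRepeat_singleton, Int.toNat_natCast, Int.toNat_natCast, Int.toNat_natCast]

-- one tile block mapped: range (m+1) comprehension = v :: replicate m z
theorem pvBlockEq (m : Nat) (v z : Int) :
    (List.range (m + 1)).map (fun j => if j % (m + 1) = 0 then v else z)
      = v :: List.replicate m z := by
  rw [List.range_succ_eq_map, List.map_cons]
  simp only [Nat.zero_mod]
  congr 1
  rw [List.map_map]
  have h : ∀ j ∈ List.range m,
      ((fun j => if j % (m + 1) = 0 then v else z) ∘ Nat.succ) j = z := by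
    intro j hj
    have hjm : j < m := List.mem_range.mp hj
    simp only [Function.comp]
    rw [Nat.mod_eq_of_lt (by omega)]
    simp
  rw [List.map_congr_left h]
  simp [List.map_const']

-- the tiled pattern: k copies of (v :: replicate m z) = comprehension over range (k*(m+1))
theorem pvTileEq (m : Nat) (v z : Int) : ∀ k : Nat,
    (List.replicate k ((v : Int) :: List.replicate m z)).flatten
      = (List.range (k * (m + 1))).map (fun j => if j % (m + 1) = 0 then v else z) := by
  intro k
  induction k with
  | zero => simp
  | succ t ih =>
    rw [List.replicate_succ, List.flatten_cons, ih,
      show (t + 1) * (m + 1) = (m + 1) + t * (m + 1) by ring, List.range_add,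
      List.map_append, List.map_map, pvBlockEq]
    congr 1
    apply List.map_congr_left
    intro j _
    simp only [Function.comp]
    rw [Nat.add_mod_left]

-- B's sliced tile equals the diagonal comprehension in Nat form
theorem pvDiagBEq (N : Nat) :
    PySem.List.slice
        (PySem.List.pyRepeat ([(1 : Int)] ++ PySem.List.pyRepeat [(0 : Int)] (N : Int)) (N : Int))
        none (some ((N : Int) * (N : Int)))
      = (List.range (N * N)).map (fun j => if j % (N + 1) = 0 then (1 : Int) else 0) := by
  rw [show ((N : Int) * (N : Int)) = ((N * N : Nat) : Int) by push_cast; ring,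
    PySem.List.slice_to_natCast, PySem.List.pyRepeat_singleton, Int.toNat_natCast]
  show ((List.replicate ((N : Int)).toNat ((1 : Int) :: List.replicate N 0)).flatten).take (N * N) = _
  rw [Int.toNat_natCast, pvTileEq N 1 0 N, ← List.map_take, List.take_range,
    show min (N * N) (N * (N + 1)) = N * N by
      have : N * N ≤ N * (N + 1) := Nat.mul_le_mul_left _ (by omega)
      omega]

-- A's diagonal comprehension, in Nat form
theorem pvDiagA (N : Nat) (v : Int) :
    (PySem.List.pyRange 0 ((N : Int) * (N : Int)) 1).map (fun i =>
        if PySem.Int.mod i ((N : Int) + 1) = 0 ∧ i < (N : Int) * (N : Int) then v else (0 : Int))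
      = (List.range (N * N)).map (fun j => if j % (N + 1) = 0 then v else 0) := by
  rw [PySem.List.pyRange_one]
  simp only [List.map_map, sub_zero]
  rw [show (((N : Int) * (N : Int))).toNat = N * N by rw [← Nat.cast_mul]; omega]
  apply List.map_congr_left
  intro j hj
  have hjM : j < N * N := List.mem_range.mp hj
  simp only [Function.comp, zero_add]
  have h1 : PySem.Int.mod (j : Int) ((N : Int) + 1) = ((j % (N + 1) : Nat) : Int) := by
    rw [show ((N : Int) + 1) = ((N + 1 : Nat) : Int) by push_cast; ring]
    exact PySem.Int.mod_natCast j (N + 1)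
  have h2 : (j : Int) < (N : Int) * (N : Int) := by
    rw [show ((N : Int) * (N : Int)) = ((N * N : Nat) : Int) by push_cast; ring]
    exact_mod_cast hjM
  have hiff : (PySem.Int.mod (j : Int) ((N : Int) + 1) = 0 ∧ (j : Int) < (N : Int) * (N : Int))
      ↔ (j % (N + 1) = 0) := by
    rw [h1]
    constructor
    · rintro ⟨x, -⟩; exact_mod_cast x
    · intro x; exact ⟨by exact_mod_cast x, h2⟩
  simp only [hiff]

-- scaling a canonical row by 2
theorem pvScaleRow (a b c : Nat) :
    (List.replicate a (0 : Int) ++ List.replicate b 1 ++ List.replicate c 0).map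
        (fun v => 2 * v)
      = List.replicate a 0 ++ List.replicate b 2 ++ List.replicate c 0 := by
  simp [List.map_replicate]

-- scaling the canonical diagonal by 2
theorem pvScaleDiag (N : Nat) :
    ((List.range (N * N)).map (fun j => if j % (N + 1) = 0 then (1 : Int) else 0)).map
        (fun v => 2 * v)
      = (List.range (N * N)).map (fun j => if j % (N + 1) = 0 then (2 : Int) else 0) := by
  rw [List.map_map]
  apply List.map_congr_left
  intro j _
  simp only [Function.comp]
  split_ifs <;> norm_num

-- both num_rows computations, in Nat form: A's parity split and B's (n+1)//2 both give (N+1)/2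
theorem pvNumRowsA (N : Nat) :
    (if PySem.Int.mod (N : Int) 2 = 0 then PySem.Int.floordiv (N : Int) 2
     else PySem.Int.floordiv (N : Int) 2 + 1) = (((N + 1) / 2 : Nat) : Int) := by
  rw [show (2 : Int) = ((2 : Nat) : Int) from rfl, PySem.Int.floordiv_natCast,
    PySem.Int.mod_natCast]
  rcases Nat.even_or_odd N with ⟨k, hk⟩ | ⟨k, hk⟩ <;> subst hk
  · rw [if_pos (by push_cast; omega)]; push_cast; omega
  · rw [if_neg (by push_cast; omega)]; push_cast; omega

theorem pvNumRowsB (N : Nat) :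
    PySem.Int.floordiv ((N : Int) + 1) 2 = (((N + 1) / 2 : Nat) : Int) := by
  rw [show ((N : Int) + 1) = ((N + 1 : Nat) : Int) by push_cast; ring,
    show (2 : Int) = ((2 : Nat) : Int) from rfl, PySem.Int.floordiv_natCast]

theorem pvMain (N : Nat) :
    generate_base_masks (N : Int) = generate_base_masks_alt (N : Int) := by
  unfold generate_base_masks generate_base_masks_alt
  simp only [pvNumRowsA, pvNumRowsB, PySem.List.foldl_append_singleton_eq_map,
    List.nil_append, List.map_append, List.map_map, List.map_cons, List.map_nil,
    List.append_assoc]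
  have hmem : ∀ r : Int, r ∈ PySem.List.pyRange 0 (((N + 1) / 2 : Nat) : Int) 1 →
      ∃ R : Nat, r = (R : Int) ∧ R < N := by
    intro r hr
    have h := PySem.List.mem_pyRange_one.mp hr
    obtain ⟨R, rfl⟩ := Int.eq_ofNat_of_zero_le h.1
    have : R < (N + 1) / 2 := by exact_mod_cast h.2
    exact ⟨R, rfl, by omega⟩
  have hrowA1 := fun r hr => (hmem r hr)
  have h1 : (PySem.List.pyRange 0 (((N + 1) / 2 : Nat) : Int) 1).map (fun r =>
        (PySem.List.pyRange 0 ((N : Int) * (N : Int)) 1).map (fun i =>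
          if r * (N : Int) ≤ i ∧ i < (r + 1) * (N : Int) then (1 : Int) else 0))
      = (PySem.List.pyRange 0 (((N + 1) / 2 : Nat) : Int) 1).map (fun r =>
          PySem.List.pyRepeat [(0 : Int)] (r * (N : Int)) ++ PySem.List.pyRepeat [(1 : Int)] (N : Int)
            ++ PySem.List.pyRepeat [(0 : Int)] ((N : Int) * (N : Int) - (r + 1) * (N : Int))) := by
    apply List.map_congr_left
    intro r hr
    obtain ⟨R, rfl, hRN⟩ := hmem r hr
    rw [pvRowAEq N R hRN 1, pvRowBEq N R hRN]
  have h2 : (PySem.List.pyRange 0 (((N + 1) / 2 : Nat) : Int) 1).map (fun r =>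
        (PySem.List.pyRange 0 ((N : Int) * (N : Int)) 1).map (fun i =>
          if r * (N : Int) ≤ i ∧ i < (r + 1) * (N : Int) then (2 : Int) else 0))
      = (PySem.List.pyRange 0 (((N + 1) / 2 : Nat) : Int) 1).map (fun r =>
          (PySem.List.pyRepeat [(0 : Int)] (r * (N : Int)) ++ PySem.List.pyRepeat [(1 : Int)] (N : Int)
            ++ PySem.List.pyRepeat [(0 : Int)] ((N : Int) * (N : Int) - (r + 1) * (N : Int))).map
              (fun v => 2 * v)) := by
    apply List.map_congr_left
    intro r hr
    obtain ⟨R, rfl, hRN⟩ := hmem r hr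
    rw [pvRowAEq N R hRN 2, pvRowBEq N R hRN, pvScaleRow]
  have hd1 : (PySem.List.pyRange 0 ((N : Int) * (N : Int)) 1).map (fun i =>
        if PySem.Int.mod i ((N : Int) + 1) = 0 ∧ i < (N : Int) * (N : Int) then (1 : Int) else 0)
      = PySem.List.slice
          (PySem.List.pyRepeat ([(1 : Int)] ++ PySem.List.pyRepeat [(0 : Int)] (N : Int)) (N : Int))
          none (some ((N : Int) * (N : Int))) := by
    rw [pvDiagA N 1, pvDiagBEq N]
  have hd2 : (PySem.List.pyRange 0 ((N : Int) * (N : Int)) 1).map (fun i =>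
        if PySem.Int.mod i ((N : Int) + 1) = 0 ∧ i < (N : Int) * (N : Int) then (2 : Int) else 0)
      = (PySem.List.slice
          (PySem.List.pyRepeat ([(1 : Int)] ++ PySem.List.pyRepeat [(0 : Int)] (N : Int)) (N : Int))
          none (some ((N : Int) * (N : Int)))).map (fun v => 2 * v) := by
    rw [pvDiagA N 2, pvDiagBEq N, pvScaleDiag]
  rw [h1, h2, hd1, hd2]
  simp [Function.comp_def, List.append_assoc]

-- ===== VERDICT (by name: the statement is the Claim_ definition above) =====
theorem generate_base_masks_spec : Claim_equal_generate_base_masks := by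
  intro n _ hpre
  unfold Spec_generate_base_masks
  obtain ⟨N, rfl⟩ := Int.eq_ofNat_of_zero_le hpre
  exact pvMain N
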